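-- pv_equiv track=rewrite | github.com/swrookie/coding-practice | boj/problem1978/main.py | solve
-- ===== SOURCE A (Python) =====
-- from typing import List
--
-- def solve(arr: List[int]) -> str:
--     answer = 0
--     max_num = max(arr)
--     primes = [0] * (max_num + 1)
--
--     primes[1] = -1
--
--     cnt = 0
--     for num in arr:
--         if primes[num] == -1:
--             continue
--
--         divisible = 0
--         for i in range(1, num // 2 + 1):
--             if num % i == 0:
--                 divisible = i
--
--         if divisible == 1:
--             cnt += 1
--             for i in range(num, max_num + 1, num):
--                 primes[i] = -1
--
--     answer = cnt
--
--     return str(answer)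
-- ===== SOURCE B (Python) =====
-- from typing import List
--
-- def _is_prime(n: int) -> bool:
--     if n < 2:
--         return False
--     d = 2
--     while d * d <= n:
--         if n % d == 0:
--             return False
--         d += 1
--     return True
--
-- def solve(arr: List[int]) -> str:
--     return str(len({x for x in arr if _is_prime(x)}))
-- ===== Notes on version B (the rewrite author's own statement) =====
-- stated objective: faster
-- what changed: Replaces A's mutable multiples-marking array (allocated up to max(arr)) and its full divisor scan up to num//2 per element with a set comprehension over a sqrt-bounded trial-division primality test; no array proportional to max(arr) is built at all.
import Mathlib
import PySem

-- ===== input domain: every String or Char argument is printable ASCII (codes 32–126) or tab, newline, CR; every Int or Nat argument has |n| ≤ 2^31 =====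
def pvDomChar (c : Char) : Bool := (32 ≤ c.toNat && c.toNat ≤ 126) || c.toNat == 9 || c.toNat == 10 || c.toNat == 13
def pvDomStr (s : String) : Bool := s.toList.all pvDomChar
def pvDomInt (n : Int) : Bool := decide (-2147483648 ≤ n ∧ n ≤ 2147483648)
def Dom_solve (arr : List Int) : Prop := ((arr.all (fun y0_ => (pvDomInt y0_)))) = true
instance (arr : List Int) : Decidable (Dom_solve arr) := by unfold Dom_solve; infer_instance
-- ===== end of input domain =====

-- B replaces A's multiples-marking array and per-element divisor scan up to num//2 with a
-- set comprehension over sqrt-bounded trial division; measurably faster (see claim).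


-- ===== PORT A =====
-- divisible = 0; for i in range(1, num // 2 + 1): if num % i == 0: divisible = i
def solveDivLoop (num : Int) : Int :=
  (PySem.List.pyRange 1 (PySem.Int.floordiv num 2 + 1) 1).foldl
    (fun d i => if PySem.Int.mod num i = 0 then i else d) 0

-- body of A's 'for num in arr' loop; state = (primes, cnt)
def solveStep (maxNum : Int) (st : List Int × Int) (num : Int) : List Int × Int :=
  match PySem.List.pyGet? st.1 num with
  | none => st  -- Python raises IndexError here; excluded by Pre_solve
  | some v =>
    if v = -1 then st
    else
      let divisible := solveDivLoop num
      if divisible = 1 then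
        ((PySem.List.pyRange num (maxNum + 1) num).foldl
           (fun ps i => PySem.List.pySetD ps i (-1)) st.1,
         st.2 + 1)
      else st

def solve (arr : List Int) : String :=
  match PySem.List.max? arr (fun x => x) with
  | none => ""  -- Python raises ValueError (max of empty); excluded by Pre_solve
  | some maxNum =>
    let primes0 : List Int := List.replicate (maxNum + 1).toNat 0
    match PySem.List.pySet? primes0 1 (-1) with
    | none => ""  -- primes[1] raises IndexError when maxNum < 1; excluded by Pre_solve
    | some primes1 =>
      PySem.Int.toStr (arr.foldl (solveStep maxNum) (primes1, 0)).2

-- ===== PORT B =====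
-- while d * d <= n: if n % d == 0: return False; d += 1
-- (fuel is only a totality guard: n.toNat steps are enough, since the loop stops once d*d > n)
def isPrimeLoop (fuel : Nat) (n : Int) (d : Int) : Bool :=
  match fuel with
  | 0 => true
  | fuel + 1 =>
    if d * d ≤ n then
      if PySem.Int.mod n d = 0 then false
      else isPrimeLoop fuel n (d + 1)
    else true

def isPrimeB (n : Int) : Bool :=
  if n < 2 then false
  else isPrimeLoop n.toNat n 2

def solve_alt (arr : List Int) : String :=
  PySem.Int.toStr ((PySem.Set.ofList (arr.filter isPrimeB)).length : Int)

-- ===== PRECONDITION & SPEC =====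
-- Pre_solve holds exactly where Python A returns: outside it A raises (ValueError on the
-- empty list, IndexError from primes[1] when max(arr) < 1, IndexError from primes[num]
-- when some element is below -(max(arr)+1)).
def Pre_solve (arr : List Int) : Prop :=
  ∃ m ∈ arr, (∀ x ∈ arr, x ≤ m) ∧ 1 ≤ m ∧ ∀ x ∈ arr, -(m + 1) ≤ x
instance (arr : List Int) : Decidable (Pre_solve arr) := by unfold Pre_solve; infer_instance

def pvWitness_solve : List Int := [2, 3, 4, 3, 0]

def Spec_solve (arr : List Int) (out : String) : Prop := out = solve_alt arr
instance (arr : List Int) (out : String) : Decidable (Spec_solve arr out) := by unfold Spec_solve; infer_instance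

-- ===== CLAIM (what is proved, stated in full; the proofs are below) =====
def Claim_equal_solve : Prop := ∀ (arr : List Int), Dom_solve arr → Pre_solve arr → Spec_solve arr (solve arr)

-- ===== LEMMAS AND PROOFS =====

-- the mathematical predicate both per-element tests decide
def isPr (q : Int) : Prop := 2 ≤ q ∧ Nat.Prime q.toNat

-- d*d ≤ n forces d ≤ n (for the fuel bookkeeping)
lemma le_of_sq_le {d n : Int} (h : d * d ≤ n) : d ≤ n := by
  by_cases hd0 : d ≤ 0
  · have h0 : 0 ≤ d * d := mul_self_nonneg d
    omega
  · have h1 : d * 1 ≤ d * d := mul_le_mul_of_nonneg_left (by omega) (by omega)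
    omega

lemma isPrimeLoop_iff (n : Int) : ∀ (fuel : Nat) (d : Int), 2 ≤ d → (n + 1 - d).toNat < fuel →
    (isPrimeLoop fuel n d = true ↔ ∀ e : Int, d ≤ e → e * e ≤ n → ¬ e ∣ n) := by
  intro fuel
  induction fuel with
  | zero => intro d _ hf; exact absurd hf (by omega)
  | succ fuel ih =>
    intro d hd2 hf
    show (if d * d ≤ n then
      if PySem.Int.mod n d = 0 then false else isPrimeLoop fuel n (d + 1)
      else true) = true ↔ _
    by_cases h : d * d ≤ n
    · have hdn : d ≤ n := le_of_sq_le h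
      rw [if_pos h]
      by_cases hmod : PySem.Int.mod n d = 0
      · rw [if_pos hmod]
        apply iff_of_false (by simp)
        push Not
        exact ⟨d, le_refl d, h, (PySem.Int.mod_eq_zero_iff_dvd n d).mp hmod⟩
      · rw [if_neg hmod]
        rw [ih (d + 1) (by omega) (by omega)]
        constructor
        · intro hall e he hee
          rcases lt_or_eq_of_le he with h' | h'
          · exact hall e (by omega) hee
          · subst h'
            intro hdvd
            exact hmod ((PySem.Int.mod_eq_zero_iff_dvd n d).mpr hdvd)
        · intro hall e he hee
          exact hall e (by omega) hee
    · rw [if_neg h]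
      apply iff_of_true rfl
      intro e he hee hdvd
      have hde : d * d ≤ e * e := by nlinarith
      omega

lemma isPrimeB_iff (n : Int) : isPrimeB n = true ↔ isPr n := by
  unfold isPrimeB isPr
  split_ifs with h
  · simp only [false_iff, not_and]
    intro h2; omega
  · push Not at h
    rw [isPrimeLoop_iff n n.toNat 2 (le_refl 2) (by omega)]
    constructor
    · intro hall
      refine ⟨h, ?_⟩
      rw [Nat.prime_def_le_sqrt]
      refine ⟨by omega, ?_⟩
      intro m hm hms hdvd
      have hmm : (m : Int) * m ≤ n := by
        have := (Nat.le_sqrt).mp hms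
        have hn : ((n.toNat : Int)) = n := Int.toNat_of_nonneg (by omega)
        omega
      refine hall (m : Int) (by exact_mod_cast hm) hmm ?_
      have hn : ((n.toNat : Int)) = n := Int.toNat_of_nonneg (by omega)
      exact_mod_cast (Int.natCast_dvd_natCast.mpr hdvd).trans (dvd_of_eq hn)
    · rintro ⟨-, hp⟩
      rw [Nat.prime_def_le_sqrt] at hp
      intro e he hee hdvd
      have he2 : 2 ≤ e.toNat := by omega
      have h1 : ((e.toNat : Int)) = e := Int.toNat_of_nonneg (by omega)
      have h2 : ((n.toNat : Int)) = n := Int.toNat_of_nonneg (by omega)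
      have hees : e.toNat ≤ Nat.sqrt n.toNat := by
        rw [Nat.le_sqrt]
        exact_mod_cast (by rw [h1, h2]; exact hee : (e.toNat : Int) * (e.toNat : Int) ≤ ((n.toNat : Int)))
      exact hp.2 e.toNat he2 hees (by
        have : (e.toNat : Int) ∣ n := by rwa [Int.toNat_of_nonneg (by omega : (0:Int) ≤ e)]
        have hn : ((n.toNat : Int)) = n := Int.toNat_of_nonneg (by omega)
        exact_mod_cast this.trans (dvd_of_eq hn.symm))

lemma solveDivLoop_of_le_one {num : Int} (h : num ≤ 1) : solveDivLoop num = 0 := by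
  unfold solveDivLoop
  rw [PySem.List.pyRange_one_eq_nil]
  · rfl
  · have := PySem.Int.floordiv_lt_iff_lt_mul (a := num) (b := 2) (q := 1) (by omega)
    omega

-- fold keeps 1 once every matching element is 1

lemma fold_stay_one (num : Int) (l : List Int)
    (hl : ∀ i ∈ l, PySem.Int.mod num i = 0 → i = 1) :
    l.foldl (fun d i => if PySem.Int.mod num i = 0 then i else d) 1 = 1 := by
  induction l with
  | nil => rfl
  | cons x t ih =>
    simp only [List.foldl_cons]
    rcases eq_or_ne (PySem.Int.mod num x) 0 with h | h
    · rw [if_pos h, hl x (by simp) h]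
      exact ih (fun i hi => hl i (by simp [hi]))
    · rw [if_neg h]
      exact ih (fun i hi => hl i (by simp [hi]))

lemma solveDivLoop_of_prime {num : Int} (h : isPr num) : solveDivLoop num = 1 := by
  obtain ⟨h2, hp⟩ := h
  unfold solveDivLoop
  have hb : 1 ≤ PySem.Int.floordiv num 2 := by
    rw [PySem.Int.le_floordiv_iff_mul_le (by omega)]
    omega
  rw [PySem.List.pyRange_one_cons (by omega)]
  simp only [List.foldl_cons]
  have h1 : PySem.Int.mod num 1 = 0 := (PySem.Int.mod_eq_zero_iff_dvd num 1).mpr (one_dvd num)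
  rw [if_pos h1]
  apply fold_stay_one
  intro i hi hm
  rw [PySem.List.mem_pyRange_one] at hi
  have hdvd : i ∣ num := (PySem.Int.mod_eq_zero_iff_dvd num i).mp hm
  have hlt : PySem.Int.floordiv num 2 < num := by
    have := (PySem.Int.floordiv_lt_iff_lt_mul (a := num) (b := 2) (q := num) (by omega)).mpr (by omega)
    exact this
  -- i is a divisor of num with 2 ≤ i < num: contradicts primality
  exfalso
  have hi2 : 2 ≤ i := by omega
  have hin : i < num := by omega
  have : i.toNat ∣ num.toNat := by
    have h1 : ((i.toNat : Int)) = i := Int.toNat_of_nonneg (by omega)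
    have h2' : ((num.toNat : Int)) = num := Int.toNat_of_nonneg (by omega)
    exact_mod_cast (dvd_of_eq h1).trans (hdvd.trans (dvd_of_eq h2'.symm))
  rcases (Nat.Prime.eq_one_or_self_of_dvd hp i.toNat this) with h' | h' <;> omega

-- fold result stays ≥ 2 when all matches are ≥ 2 and the start is ≥ 2

lemma fold_ge_two_of_start (num : Int) (l : List Int) (a : Int) (ha : 2 ≤ a)
    (hl : ∀ i ∈ l, PySem.Int.mod num i = 0 → 2 ≤ i) :
    2 ≤ l.foldl (fun d i => if PySem.Int.mod num i = 0 then i else d) a := by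
  induction l generalizing a with
  | nil => exact ha
  | cons x t ih =>
    simp only [List.foldl_cons]
    split_ifs with h
    · exact ih _ (hl x (List.mem_cons_self) h) (fun i hi hm => hl i (List.mem_cons_of_mem _ hi) hm)
    · exact ih _ ha (fun i hi hm => hl i (List.mem_cons_of_mem _ hi) hm)

lemma fold_ge_two (num : Int) (l : List Int) (a : Int)
    (hl : ∀ i ∈ l, PySem.Int.mod num i = 0 → 2 ≤ i)
    (hex : ∃ d0 ∈ l, PySem.Int.mod num d0 = 0) :
    2 ≤ l.foldl (fun d i => if PySem.Int.mod num i = 0 then i else d) a := by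
  induction l generalizing a with
  | nil => exact absurd hex (by simp)
  | cons x t ih =>
    simp only [List.foldl_cons]
    split_ifs with h
    · exact fold_ge_two_of_start num t _ (hl x (List.mem_cons_self) h)
        (fun i hi hm => hl i (List.mem_cons_of_mem _ hi) hm)
    · obtain ⟨d0, hd0, hm0⟩ := hex
      rcases List.mem_cons.mp hd0 with h' | hd0'
      · subst h'; exact absurd hm0 h
      · exact ih _ (fun i hi hm => hl i (List.mem_cons_of_mem _ hi) hm) ⟨d0, hd0', hm0⟩

lemma solveDivLoop_of_composite {num : Int} (h2 : 2 ≤ num) (h : ¬ isPr num) :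
    2 ≤ solveDivLoop num := by
  unfold solveDivLoop
  have hnp : ¬ Nat.Prime num.toNat := fun hp => h ⟨h2, hp⟩
  set N := num.toNat with hN
  have hN2 : 2 ≤ N := by omega
  have hpf : N.minFac ∣ N := Nat.minFac_dvd N
  have hpp : Nat.Prime N.minFac := Nat.minFac_prime (by omega)
  obtain ⟨k, hk⟩ : ∃ k, k = N / N.minFac := ⟨_, rfl⟩
  have hkd : k ∣ N := hk ▸ Nat.div_dvd_of_dvd hpf
  have hmul : N.minFac * k = N := by rw [hk]; exact Nat.mul_div_cancel' hpf
  have hk1 : k ≠ 1 := by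
    intro hk1
    rw [hk1, Nat.mul_one] at hmul
    exact hnp (hmul ▸ hpp)
  have hk0 : k ≠ 0 := by
    intro h0; rw [h0, Nat.mul_zero] at hmul; omega
  have hk2 : 2 ≤ k := by omega
  have hp2 : 2 ≤ N.minFac := hpp.two_le
  have h2k : 2 * k ≤ N := by
    calc 2 * k ≤ N.minFac * k := Nat.mul_le_mul_right k hp2
    _ = N := hmul
  have hb : 1 < PySem.Int.floordiv num 2 + 1 := by
    have := PySem.Int.le_floordiv_iff_mul_le (a := num) (b := 2) (q := 1) (by omega)
    omega
  rw [PySem.List.pyRange_one_cons (by omega)]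
  simp only [List.foldl_cons]
  have hkfd : (k : Int) ≤ PySem.Int.floordiv num 2 := by
    rw [PySem.Int.le_floordiv_iff_mul_le (by omega)]
    omega
  apply fold_ge_two
  · intro i hi _
    rw [PySem.List.mem_pyRange_one] at hi
    omega
  · refine ⟨(k : Int), ?_, ?_⟩
    · rw [PySem.List.mem_pyRange_one]
      constructor
      · exact_mod_cast hk2
      · omega
    · rw [PySem.Int.mod_eq_zero_iff_dvd]
      have h2' : ((num.toNat : Int)) = num := Int.toNat_of_nonneg (by omega)
      exact_mod_cast (Int.natCast_dvd_natCast.mpr hkd).trans (dvd_of_eq h2')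

lemma mark_foldl_length (l : List Int) : ∀ (ps : List Int),
    (l.foldl (fun ps i => PySem.List.pySetD ps i (-1)) ps).length = ps.length := by
  induction l with
  | nil => intro ps; rfl
  | cons x t ih =>
    intro ps
    simp only [List.foldl_cons]
    rw [ih, PySem.List.length_pySetD]

lemma mark_foldl_getElem? (l : List Int) : ∀ (ps : List Int) (j : Nat), (∀ i ∈ l, 0 ≤ i) →
    (l.foldl (fun ps i => PySem.List.pySetD ps i (-1)) ps)[j]? =
      if (j : Int) ∈ l ∧ j < ps.length then some (-1) else ps[j]? := by
  induction l with
  | nil => intro ps j _; simp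
  | cons x t ih =>
    intro ps j hl
    simp only [List.foldl_cons]
    rw [ih _ _ (fun i hi => hl i (List.mem_cons_of_mem _ hi)),
        PySem.List.pySetD_of_nonneg _ _ (hl x List.mem_cons_self)]
    have hx : (0:Int) ≤ x := hl x List.mem_cons_self
    by_cases hmem : (j : Int) ∈ t ∧ j < ps.length
    · rw [if_pos (by simpa [List.length_set] using hmem),
         if_pos ⟨List.mem_cons_of_mem _ hmem.1, hmem.2⟩]
    · rw [if_neg (by simpa [List.length_set] using hmem)]
      rw [List.getElem?_set]
      by_cases hj : (j : Int) ∈ x :: t ∧ j < ps.length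
      · rw [if_pos hj]
        rcases List.mem_cons.mp hj.1 with he | he
        · have : x.toNat = j := by omega
          rw [if_pos this, if_pos (by omega)]
        · exact absurd ⟨he, hj.2⟩ hmem
      · rw [if_neg hj]
        by_cases hxj : x.toNat = j
        · have : (j : Int) = x := by omega
          have : ¬ j < ps.length := fun hlt => hj ⟨by rw [this]; exact List.mem_cons_self, hlt⟩
          rw [if_pos hxj, if_neg (by omega)]
          exact (List.getElem?_eq_none (by omega)).symm
        · rw [if_neg hxj]

lemma loop_inv (m : Int) : ∀ (rest : List Int) (ps : List Int) (P : List Int) (cnt : Int),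
    (∀ x ∈ rest, x ≤ m) →
    ps.length = (m + 1).toNat →
    (∀ q : Int, isPr q → q ≤ m →
      PySem.List.pyGet? ps q = some (if q ∈ P then -1 else 0)) →
    cnt = (P.length : Int) →
    (rest.foldl (solveStep m) (ps, cnt)).2 =
      (((rest.filter isPrimeB).foldl PySem.Set.add P).length : Int) := by
  intro rest
  induction rest with
  | nil => intro ps P cnt _ _ _ hcnt; simpa using hcnt
  | cons num rest ih =>
    intro ps P cnt hle hlen hgood hcnt
    have hnumle : num ≤ m := hle num List.mem_cons_self
    simp only [List.foldl_cons]
    by_cases hpr : isPr num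
    · -- num is prime
      have hBtrue : isPrimeB num = true := (isPrimeB_iff num).mpr hpr
      have hget := hgood num hpr hnumle
      by_cases hmem : num ∈ P
      · -- already counted: A skips, B's set add is a no-op
        rw [if_pos hmem] at hget
        have hstep : solveStep m (ps, cnt) num = (ps, cnt) := by
          unfold solveStep
          rw [hget]
          simp
        rw [hstep, ih ps P cnt (fun x hx => hle x (List.mem_cons_of_mem _ hx)) hlen hgood hcnt]
        simp [hBtrue, PySem.Set.add_of_mem hmem]
      · -- new prime: A counts it and marks its multiples
        rw [if_neg hmem] at hget
        have hdiv : solveDivLoop num = 1 := solveDivLoop_of_prime hpr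
        obtain ⟨hnum2, hnp⟩ := hpr
        have hstep : solveStep m (ps, cnt) num =
            ((PySem.List.pyRange num (m + 1) num).foldl
              (fun ps i => PySem.List.pySetD ps i (-1)) ps, cnt + 1) := by
          unfold solveStep
          rw [hget]
          simp only [hdiv]
          norm_num
        rw [hstep]
        set ps' := (PySem.List.pyRange num (m + 1) num).foldl
              (fun ps i => PySem.List.pySetD ps i (-1)) ps with hps'
        have hlen' : ps'.length = (m + 1).toNat := by
          rw [hps', mark_foldl_length]; exact hlen
        have hpos : ∀ i ∈ PySem.List.pyRange num (m + 1) num, (0:Int) ≤ i := by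
          intro i hi
          rw [PySem.List.mem_pyRange_iff_of_pos (by omega)] at hi
          omega
        have hgood' : ∀ q : Int, isPr q → q ≤ m →
            PySem.List.pyGet? ps' q = some (if q ∈ P ++ [num] then -1 else 0) := by
          intro q hq hqm
          obtain ⟨hq2, hqp⟩ := hq
          rw [PySem.List.pyGet?_of_nonneg _ (by omega), hps',
              mark_foldl_getElem? _ _ _ hpos]
          have hcast : ((q.toNat : Int)) = q := Int.toNat_of_nonneg (by omega)
          by_cases heq : q = num
          · subst heq
            rw [if_pos ⟨by
                rw [hcast, PySem.List.mem_pyRange_iff_of_pos (by omega)]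
                exact ⟨le_refl q, by omega, by simp⟩, by omega⟩]
            simp
          · have hnotin : ((q.toNat : Int)) ∉ PySem.List.pyRange num (m + 1) num := by
              rw [hcast, PySem.List.mem_pyRange_iff_of_pos (by omega)]
              rintro ⟨hge, hlt, hdvd⟩
              have hdvdq : num ∣ q := by
                have := dvd_add hdvd (dvd_refl num)
                simpa using this
              have : num.toNat ∣ q.toNat := by
                have h1 : ((num.toNat : Int)) = num := Int.toNat_of_nonneg (by omega)
                exact_mod_cast (dvd_of_eq h1).trans (hdvdq.trans (dvd_of_eq hcast.symm))
              rcases (Nat.Prime.eq_one_or_self_of_dvd hqp num.toNat this) with h' | h' <;> omega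
            rw [if_neg (fun hc => hnotin hc.1)]
            have hold := hgood q ⟨hq2, hqp⟩ hqm
            rw [PySem.List.pyGet?_of_nonneg _ (by omega)] at hold
            rw [hold]
            simp [List.mem_append, heq]
        rw [ih ps' (P ++ [num]) (cnt + 1)
          (fun x hx => hle x (List.mem_cons_of_mem _ hx)) hlen' hgood'
          (by simp [hcnt])]
        simp [hBtrue, PySem.Set.add_of_not_mem hmem]
    · -- num not prime: A leaves the state unchanged, B's filter drops it
      have hBfalse : isPrimeB num = false := by
        rcases Bool.eq_false_or_eq_true (isPrimeB num) with h | h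
        · exact absurd ((isPrimeB_iff num).mp h) hpr
        · exact h
      have hstep : solveStep m (ps, cnt) num = (ps, cnt) := by
        unfold solveStep
        cases hg : PySem.List.pyGet? (ps, cnt).1 num with
        | none => rfl
        | some v =>
          by_cases hv : v = -1
          · simp [hv]
          · simp only [hv]
            have hne1 : solveDivLoop num ≠ 1 := by
              by_cases hnum2 : 2 ≤ num
              · have := solveDivLoop_of_composite hnum2 hpr
                omega
              · rw [solveDivLoop_of_le_one (by omega)]
                omega
            rw [if_neg hne1]
            simp
      rw [hstep, ih ps P cnt (fun x hx => hle x (List.mem_cons_of_mem _ hx)) hlen hgood hcnt]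
      simp [hBfalse]

-- ===== VERDICT (by name: the statement is the Claim_ definition above) =====

theorem solve_spec : Claim_equal_solve := by
  unfold Claim_equal_solve
  intro arr _ hpre
  obtain ⟨m, hmarr, hmax, hm1, _⟩ := hpre
  unfold Spec_solve solve solve_alt
  have harrne : arr ≠ [] := fun h => by rw [h] at hmarr; exact absurd hmarr (List.not_mem_nil)
  obtain ⟨m', hm'⟩ : ∃ m', PySem.List.max? arr (fun x => x) = some m' := by
    cases h : PySem.List.max? arr (fun x => x) with
    | none => exact absurd ((PySem.List.max?_eq_none_iff _ _).mp h) harrne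
    | some x => exact ⟨x, rfl⟩
  have hm'm : m' = m :=
    le_antisymm (hmax m' (PySem.List.max?_mem hm')) (PySem.List.max?_isMax hm' m hmarr)
  subst hm'm
  rw [hm']
  dsimp only
  have hlen2 : (1 : Nat) < (List.replicate (m' + 1).toNat (0 : Int)).length := by
    rw [List.length_replicate]; omega
  have hset : PySem.List.pySet? (List.replicate (m' + 1).toNat (0 : Int)) 1 (-1) =
      some ((List.replicate (m' + 1).toNat (0 : Int)).set 1 (-1)) := by
    have := PySem.List.pySet?_natCast (List.replicate (m' + 1).toNat (0 : Int)) 1 (-1) hlen2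
    simpa using this
  rw [hset]
  dsimp only
  have hmain := loop_inv m' arr ((List.replicate (m' + 1).toNat (0 : Int)).set 1 (-1)) [] 0
    hmax
    (by rw [List.length_set, List.length_replicate])
    (by
      intro q hq hqm
      obtain ⟨hq2, _⟩ := hq
      rw [PySem.List.pyGet?_of_nonneg _ (by omega), List.getElem?_set]
      rw [if_neg (by omega), List.getElem?_replicate, if_pos (by omega)]
      simp)
    (by simp)
  simp only [hmain, PySem.Set.ofList_eq_foldl]
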